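-- pv_equiv track=rewrite | github.com/StBinge/leetcode | 940.不同的子序列-ii.py | distinctSubseqII
-- ===== SOURCE A (Python) =====
-- def distinctSubseqII(s: str) -> int:
--     g=[0]*26
--     Mod=10**9+7
--     total=0
--     for c in s:
--         idx=ord(c)-ord('a')
--         total,g[idx]=(2*total+1-g[idx])%Mod,(total+1)%Mod
--
--     return total
-- ===== SOURCE B (Python) =====
-- def distinctSubseqII(s: str) -> int:
--     # Count distinct non-empty subsequences by their FIRST character: scanning
--     # right-to-left, begins[c] = number (mod 1e9+7) of distinct subsequences of
--     # the current suffix that begin with c (= 1 + count for the suffix after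
--     # this position); the answer is the sum of the table.
--     Mod = 10 ** 9 + 7
--     begins = [0] * 26
--     for c in reversed(s):
--         begins[ord(c) - 97] = (sum(begins) + 1) % Mod
--     return sum(begins) % Mod
-- ===== Notes on version B (the rewrite author's own statement) =====
-- stated objective: alternative
-- what changed: B scans the string right-to-left counting subsequences by their FIRST character (begins[c] = 1 + count of the strictly later suffix, re-summing the table for the total), instead of A's left-to-right ending-counts DP with its running total and 2*total+1-g[idx] subtraction trick; equality rests on the fact that a string and its reverse have the same number of distinct subsequences.
import Mathlib
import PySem

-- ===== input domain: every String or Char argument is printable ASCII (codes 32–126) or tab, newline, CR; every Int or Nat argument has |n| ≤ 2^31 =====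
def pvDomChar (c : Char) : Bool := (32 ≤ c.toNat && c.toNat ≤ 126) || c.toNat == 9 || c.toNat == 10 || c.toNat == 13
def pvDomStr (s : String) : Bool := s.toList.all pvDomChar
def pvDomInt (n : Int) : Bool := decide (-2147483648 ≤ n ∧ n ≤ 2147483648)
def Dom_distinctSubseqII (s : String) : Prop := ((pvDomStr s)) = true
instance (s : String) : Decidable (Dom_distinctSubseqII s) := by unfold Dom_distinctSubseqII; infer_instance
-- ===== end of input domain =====

-- B counts distinct non-empty subsequences (mod 1e9+7) by their FIRST character, scanning
-- right-to-left and re-deriving the total from the table, instead of A's left-to-right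
-- ending-counts DP with a running total and its 2*total+1-g[idx] subtraction (objective: alternative).

-- ===== PORT A =====
-- loop body of A: total,g[idx] = (2*total+1-g[idx])%Mod, (total+1)%Mod  (simultaneous, old total on both)
def pvStepA (st : Int × List Int) (c : Char) : Int × List Int :=
  let idx : Int := (c.toNat : Int) - 97
  (PySem.Int.mod (2 * st.1 + 1 - PySem.List.pyGetD st.2 idx 0) 1000000007,
   PySem.List.pySetD st.2 idx (PySem.Int.mod (st.1 + 1) 1000000007))

def distinctSubseqII (s : String) : Int :=
  (s.toList.foldl pvStepA (0, List.replicate 26 0)).1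

-- ===== PORT B =====
-- loop body of B: begins[ord(c)-97] = (sum(begins) + 1) % Mod, over reversed(s)
def pvStepB (begins : List Int) (c : Char) : List Int :=
  PySem.List.pySetD begins ((c.toNat : Int) - 97)
    (PySem.Int.mod (begins.sum + 1) 1000000007)

def distinctSubseqII_alt (s : String) : Int :=
  PySem.Int.mod (s.toList.reverse.foldl pvStepB (List.replicate 26 0)).sum 1000000007

-- ===== PRECONDITION & SPEC =====
-- Pre_ excludes exactly the inputs on which A (and B alike) raises IndexError:
-- a character with code > 122 gives index ord(c)-97 ≥ 26, one with code < 71 gives index < -26.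
def Pre_distinctSubseqII (s : String) : Prop :=
  (s.toList.all (fun c => 71 ≤ c.toNat && c.toNat ≤ 122)) = true
instance (s : String) : Decidable (Pre_distinctSubseqII s) := by
  unfold Pre_distinctSubseqII; infer_instance
def pvWitness_distinctSubseqII : String := "abaG"
def Spec_distinctSubseqII (s : String) (out : Int) : Prop := out = distinctSubseqII_alt s
instance (s : String) (out : Int) : Decidable (Spec_distinctSubseqII s out) := by
  unfold Spec_distinctSubseqII; infer_instance

-- ===== CLAIM (what is proved, stated in full; the proofs are below) =====
def Claim_equal_distinctSubseqII : Prop :=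
  ∀ (s : String), Dom_distinctSubseqII s → Pre_distinctSubseqII s →
    Spec_distinctSubseqII s (distinctSubseqII s)

-- ===== LEMMAS AND PROOFS =====

-- The count both programs compute: pvS L = the set of (distinct) subsequences of L,
-- pvNS its size (including the empty one), pvE a L = how many end in the letter a.
-- Characters act through their 26 array slots (Python's negative indexing wraps
-- codes 71..96 onto slots 0..25), so everything is stated over lists of slot numbers.
def pvSlot (c : Char) : Nat := if 97 ≤ c.toNat then c.toNat - 97 else c.toNat - 71

def pvS (L : List Nat) : Finset (List Nat) := L.sublists.toFinset
def pvNS (L : List Nat) : Nat := (pvS L).card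
def pvE (a : Nat) (L : List Nat) : Nat :=
  ((pvS L).filter (fun t => t.getLast? = some a)).card

theorem pv_mem_S (t L : List Nat) : t ∈ pvS L ↔ t.Sublist L := by
  simp [pvS]

theorem pv_toFinset_map (l : List (List Nat)) (f : List Nat → List Nat) :
    (l.map f).toFinset = l.toFinset.image f := by
  ext t; simp

theorem pv_S_concat (L : List Nat) (a : Nat) :
    pvS (L ++ [a]) = pvS L ∪ (pvS L).image (· ++ [a]) := by
  simp [pvS, List.sublists_concat, List.toFinset_append, pv_toFinset_map]

theorem pv_image_card (L : List Nat) (a : Nat) :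
    ((pvS L).image (· ++ [a])).card = pvNS L :=
  Finset.card_image_of_injective _ fun _ _ h => List.append_cancel_right h

theorem pv_inter_eq (L : List Nat) (a : Nat) :
    pvS L ∩ (pvS L).image (· ++ [a]) = (pvS L).filter (fun t => t.getLast? = some a) := by
  ext t
  simp only [Finset.mem_inter, Finset.mem_image, Finset.mem_filter, pv_mem_S]
  constructor
  · rintro ⟨ht, u, _, rfl⟩
    exact ⟨ht, by simp⟩
  · rintro ⟨ht, hlast⟩
    exact ⟨ht, t.dropLast, (List.dropLast_sublist t).trans ht,
      List.dropLast_append_getLast? a hlast⟩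

-- new subsequences contributed by a final letter a: 2·|S| minus the ones already ending in a
theorem pv_NS_concat (L : List Nat) (a : Nat) :
    pvNS (L ++ [a]) + pvE a L = 2 * pvNS L := by
  have h := Finset.card_union_add_card_inter (pvS L) ((pvS L).image (· ++ [a]))
  rw [pv_inter_eq] at h
  have h2 := pv_image_card L a
  unfold pvNS pvE at *
  rw [pv_S_concat]
  omega

theorem pv_E_concat_self (L : List Nat) (a : Nat) :
    pvE a (L ++ [a]) = pvNS L := by
  unfold pvE
  rw [pv_S_concat, Finset.filter_union]
  have h1 : ((pvS L).image (· ++ [a])).filter (fun t => t.getLast? = some a)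
      = (pvS L).image (· ++ [a]) := by
    rw [Finset.filter_eq_self]
    intro t ht
    obtain ⟨u, _, rfl⟩ := Finset.mem_image.mp ht
    simp
  have h2 : (pvS L).filter (fun t => t.getLast? = some a) ⊆ (pvS L).image (· ++ [a]) := by
    intro t ht
    obtain ⟨htS, hlast⟩ := Finset.mem_filter.mp ht
    exact Finset.mem_image.mpr ⟨t.dropLast,
      (pv_mem_S _ L).mpr ((List.dropLast_sublist t).trans ((pv_mem_S t L).mp htS)),
      List.dropLast_append_getLast? a hlast⟩
  rw [h1, Finset.union_eq_right.mpr h2, pv_image_card]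

theorem pv_E_concat_ne (L : List Nat) (a c : Nat) (h : c ≠ a) :
    pvE c (L ++ [a]) = pvE c L := by
  unfold pvE
  rw [pv_S_concat, Finset.filter_union]
  have h1 : ((pvS L).image (· ++ [a])).filter (fun t => t.getLast? = some c) = ∅ := by
    rw [Finset.filter_eq_empty_iff]
    intro t ht
    obtain ⟨u, _, rfl⟩ := Finset.mem_image.mp ht
    simp [h.symm]
  rw [h1, Finset.union_empty]

theorem pv_NS_nil : pvNS [] = 1 := by decide

theorem pv_E_nil (c : Nat) : pvE c [] = 0 := by
  unfold pvE pvS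
  simp

-- a word and its reverse have the same number of distinct subsequences
theorem pv_NS_reverse (L : List Nat) : pvNS L.reverse = pvNS L := by
  unfold pvNS
  have h : pvS L.reverse = (pvS L).image List.reverse := by
    ext t
    simp only [pv_mem_S, Finset.mem_image]
    constructor
    · intro ht
      exact ⟨t.reverse, by simpa using List.reverse_sublist.mpr ht, by simp⟩
    · rintro ⟨u, hu, rfl⟩
      simpa using List.reverse_sublist.mpr hu
  rw [h, Finset.card_image_of_injective _ List.reverse_injective]

-- the non-empty subsequences partition by their last letter
theorem pv_sumE (L : List Nat) (h : ∀ x ∈ L, x < 26) :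
    (∑ k ∈ Finset.range 26, pvE k L) + 1 = pvNS L := by
  induction L using List.reverseRecOn with
  | nil => simp [pv_E_nil, pv_NS_nil]
  | append_singleton L a ih =>
    have ha : a ∈ Finset.range 26 := Finset.mem_range.mpr (h a (by simp))
    have ih' := ih fun x hx => h x (by simp [hx])
    have hc := pv_NS_concat L a
    rw [← Finset.add_sum_erase _ (fun k => pvE k L) ha] at ih'
    rw [← Finset.add_sum_erase _ (fun k => pvE k (L ++ [a])) ha]
    rw [pv_E_concat_self]
    have hrest : ∑ k ∈ (Finset.range 26).erase a, pvE k (L ++ [a])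
        = ∑ k ∈ (Finset.range 26).erase a, pvE k L :=
      Finset.sum_congr rfl fun k hk =>
        pv_E_concat_ne L a k (Finset.ne_of_mem_erase hk)
    rw [hrest]
    omega

-- Python-indexing bridges: index ord(c)-97 resolves to slot pvSlot c
theorem pv_idx_bridge (c : Char) (h1 : 71 ≤ c.toNat) (h2 : c.toNat ≤ 122) :
    PySem.List.pyIdx? 26 ((c.toNat : Int) - 97) = some (pvSlot c) := by
  unfold PySem.List.pyIdx? pvSlot
  split_ifs with h3 h4 h5 <;> simp_all <;> try omega

theorem pv_slot_lt (c : Char) (h1 : 71 ≤ c.toNat) (h2 : c.toNat ≤ 122) : pvSlot c < 26 := by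
  unfold pvSlot; split_ifs <;> omega

theorem pv_getD_bridge (g : List Int) (c : Char) (h1 : 71 ≤ c.toNat) (h2 : c.toNat ≤ 122)
    (hg : g.length = 26) :
    PySem.List.pyGetD g ((c.toNat : Int) - 97) 0 = g.getD (pvSlot c) 0 := by
  have hk := pv_idx_bridge c h1 h2
  simp only [PySem.List.pyGetD, PySem.List.pyGet?, hg, hk, Option.bind_some,
    List.getD_eq_getElem?_getD]

theorem pv_setD_bridge (g : List Int) (c : Char) (v : Int) (h1 : 71 ≤ c.toNat)
    (h2 : c.toNat ≤ 122) (hg : g.length = 26) :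
    PySem.List.pySetD g ((c.toNat : Int) - 97) v = g.set (pvSlot c) v := by
  have hk := pv_idx_bridge c h1 h2
  simp only [PySem.List.pySetD, PySem.List.pySet?, hg, hk, Option.map_some, Option.getD_some]

theorem pv_getD_set (g : List Int) (a k : Nat) (v : Int) (hk : k < g.length) :
    (g.set a v).getD k 0 = if k = a then v else g.getD k 0 := by
  rw [List.getD_eq_getElem _ _ (by simpa using hk), List.getD_eq_getElem _ _ hk,
    List.getElem_set]
  simp [eq_comm]

theorem pv_sum_eq_range (l : List Int) :
    l.sum = ∑ i ∈ Finset.range l.length, l.getD i 0 := by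
  induction l using List.reverseRecOn with
  | nil => simp
  | append_singleton l a ih =>
    rw [List.sum_append, List.length_append, List.sum_singleton, List.length_singleton,
      Finset.sum_range_succ, ih]
    congr 1
    · exact Finset.sum_congr rfl fun i hi => by
        rw [List.getD_append _ _ _ _ (Finset.mem_range.mp hi)]
    · simp

theorem pv_mod_eq (a : Int) : PySem.Int.mod a 1000000007 = a % 1000000007 :=
  PySem.Int.mod_eq_emod_of_pos (by norm_num)

theorem pv_getD_replicate (n k : Nat) : (List.replicate n (0:Int)).getD k 0 = 0 := by
  induction n generalizing k with
  | zero => simp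
  | succ n ih => cases k <;> simp [List.replicate_succ]

theorem pv_modXY (X Y : Int) :
    (2 * (X % 1000000007) + 1 - Y % 1000000007) % 1000000007
      = (2 * X + 1 - Y) % 1000000007 := by
  conv_lhs => rw [Int.sub_emod, Int.add_emod, Int.mul_emod]
  conv_rhs => rw [Int.sub_emod, Int.add_emod, Int.mul_emod]
  simp [Int.emod_emod_of_dvd]

theorem pv_modX1 (X : Int) :
    (X % 1000000007 + 1) % 1000000007 = (X + 1) % 1000000007 := by
  conv_lhs => rw [Int.add_emod]
  conv_rhs => rw [Int.add_emod]
  simp [Int.emod_emod_of_dvd]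

-- A's loop invariant: the running total is (|subsequences|-1) mod M and
-- slot k of g holds (number ending in k) mod M, over the processed prefix's slots
theorem pv_A_loop (l : List Char) (h : ∀ c ∈ l, 71 ≤ c.toNat ∧ c.toNat ≤ 122) :
    (l.foldl pvStepA (0, List.replicate 26 0)).1
        = ((pvNS (l.map pvSlot) : Int) - 1) % 1000000007
    ∧ (l.foldl pvStepA (0, List.replicate 26 0)).2.length = 26
    ∧ ∀ k, k < 26 → (l.foldl pvStepA (0, List.replicate 26 0)).2.getD k 0
        = (pvE k (l.map pvSlot) : Int) % 1000000007 := by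
  induction l using List.reverseRecOn with
  | nil =>
    exact ⟨by rw [List.map_nil, pv_NS_nil]; rfl, by simp,
      fun k hk => by rw [List.map_nil, pv_E_nil, List.foldl_nil, pv_getD_replicate]; rfl⟩
  | append_singleton l c ih =>
    obtain ⟨hc1, hc2⟩ := h c (by simp)
    obtain ⟨iht, ihlen, ihg⟩ := ih fun x hx => h x (by simp [hx])
    set st := l.foldl pvStepA (0, List.replicate 26 0) with hst
    set m := l.map pvSlot with hm
    set a := pvSlot c with hac
    have halt : a < 26 := pv_slot_lt c hc1 hc2
    have hmap : (l ++ [c]).map pvSlot = m ++ [a] := by simp [hm, hac]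
    have hfold : (l ++ [c]).foldl pvStepA (0, List.replicate 26 0) = pvStepA st c := by
      rw [List.foldl_append]; rfl
    -- integer restatement of the counting recurrence
    have hcast := pv_NS_concat m a
    refine ⟨?_, ?_, ?_⟩
    · rw [hfold]
      show PySem.Int.mod (2 * st.1 + 1 - PySem.List.pyGetD st.2 ((c.toNat : Int) - 97) 0)
          1000000007 = _
      rw [pv_getD_bridge st.2 c hc1 hc2 ihlen, pv_mod_eq, iht, ihg a halt, hmap, pv_modXY]
      congr 1
      omega
    · rw [hfold]
      show (PySem.List.pySetD st.2 ((c.toNat : Int) - 97) _).length = 26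
      rw [pv_setD_bridge st.2 c _ hc1 hc2 ihlen, List.length_set, ihlen]
    · intro k hk
      rw [hfold]
      show (PySem.List.pySetD st.2 ((c.toNat : Int) - 97)
          (PySem.Int.mod (st.1 + 1) 1000000007)).getD k 0 = _
      rw [pv_setD_bridge st.2 c _ hc1 hc2 ihlen, pv_getD_set st.2 a k _ (by omega), hmap]
      by_cases hka : k = a
      · subst hka
        rw [if_pos rfl, pv_mod_eq, iht, pv_E_concat_self, pv_modX1]
        congr 1
        omega
      · rw [if_neg hka, ihg k hk, pv_E_concat_ne m a k hka]

-- the sum of a table of residues, taken mod M, is the mod-M sum of the true counts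
theorem pv_sum_table (g : List Int) (m : List Nat) (hlen : g.length = 26)
    (hval : ∀ k, k < 26 → g.getD k 0 = (pvE k m : Int) % 1000000007)
    (hall : ∀ x ∈ m, x < 26) :
    g.sum % 1000000007 = ((pvNS m : Int) - 1) % 1000000007 := by
  rw [pv_sum_eq_range, hlen]
  have h1 : ∑ i ∈ Finset.range 26, g.getD i 0
      = ∑ i ∈ Finset.range 26, (pvE i m : Int) % 1000000007 :=
    Finset.sum_congr rfl fun i hi => hval i (Finset.mem_range.mp hi)
  rw [h1, (Finset.sum_int_mod (Finset.range 26) 1000000007 _).symm, ← Nat.cast_sum]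
  have := pv_sumE m hall
  congr 1
  omega

-- B's loop invariant: slot k of begins holds, mod M, the number of distinct
-- subsequences of the processed (reversed) prefix's slots that end in k
theorem pv_B_loop (l : List Char) (h : ∀ c ∈ l, 71 ≤ c.toNat ∧ c.toNat ≤ 122) :
    (l.foldl pvStepB (List.replicate 26 0)).length = 26 ∧
    ∀ k, k < 26 → (l.foldl pvStepB (List.replicate 26 0)).getD k 0
        = (pvE k (l.map pvSlot) : Int) % 1000000007 := by
  induction l using List.reverseRecOn with
  | nil => exact ⟨by simp, fun k hk => by rw [List.map_nil, pv_E_nil, List.foldl_nil, pv_getD_replicate]; rfl⟩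
  -- (pvE k [] = 0 and 0 % M = 0)
  | append_singleton l c ih =>
    obtain ⟨hc1, hc2⟩ := h c (by simp)
    obtain ⟨ihlen, ihg⟩ := ih fun x hx => h x (by simp [hx])
    set g := l.foldl pvStepB (List.replicate 26 0) with hg
    set m := l.map pvSlot with hm
    set a := pvSlot c with hac
    have halt : a < 26 := pv_slot_lt c hc1 hc2
    have hmap : (l ++ [c]).map pvSlot = m ++ [a] := by simp [hm, hac]
    have hall : ∀ x ∈ m, x < 26 := by
      intro x hx
      obtain ⟨d, hd, rfl⟩ := List.mem_map.mp hx
      obtain ⟨hd1, hd2⟩ := h d (by simp [hd])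
      exact pv_slot_lt d hd1 hd2
    have hsum : g.sum % 1000000007 = ((pvNS m : Int) - 1) % 1000000007 :=
      pv_sum_table g m ihlen ihg hall
    have hfold : (l ++ [c]).foldl pvStepB (List.replicate 26 0) = pvStepB g c := by
      rw [List.foldl_append]; rfl
    refine ⟨?_, ?_⟩
    · rw [hfold]
      show (PySem.List.pySetD g ((c.toNat : Int) - 97)
          (PySem.Int.mod (g.sum + 1) 1000000007)).length = 26
      rw [pv_setD_bridge g c _ hc1 hc2 ihlen, List.length_set, ihlen]
    · intro k hk
      rw [hfold]
      show (PySem.List.pySetD g ((c.toNat : Int) - 97)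
          (PySem.Int.mod (g.sum + 1) 1000000007)).getD k 0 = _
      rw [pv_setD_bridge g c _ hc1 hc2 ihlen, pv_getD_set g a k _ (by omega), hmap]
      by_cases hka : k = a
      · subst hka
        rw [if_pos rfl, pv_mod_eq, ← pv_modX1, hsum, pv_modX1, pv_E_concat_self]
        congr 1
        omega
      · rw [if_neg hka, ihg k hk, pv_E_concat_ne m a k hka]

-- ===== VERDICT (by name: the statement is the Claim_ definition above) =====
theorem distinctSubseqII_spec : Claim_equal_distinctSubseqII := by
  intro s _ hpre
  have hall : ∀ c ∈ s.toList, 71 ≤ c.toNat ∧ c.toNat ≤ 122 := by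
    simpa [Pre_distinctSubseqII, List.all_eq_true] using hpre
  have hrev : ∀ c ∈ s.toList.reverse, 71 ≤ c.toNat ∧ c.toNat ≤ 122 := fun c hc =>
    hall c (List.mem_reverse.mp hc)
  obtain ⟨hAt, _, _⟩ := pv_A_loop s.toList hall
  obtain ⟨hBlen, hBg⟩ := pv_B_loop s.toList.reverse hrev
  unfold Spec_distinctSubseqII distinctSubseqII distinctSubseqII_alt
  rw [hAt]
  set g := s.toList.reverse.foldl pvStepB (List.replicate 26 0) with hg
  have hallrev : ∀ x ∈ (s.toList.reverse.map pvSlot), x < 26 := by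
    intro x hx
    obtain ⟨d, hd, rfl⟩ := List.mem_map.mp hx
    obtain ⟨hd1, hd2⟩ := hrev d hd
    exact pv_slot_lt d hd1 hd2
  have hsum : g.sum % 1000000007
      = ((pvNS (s.toList.reverse.map pvSlot) : Int) - 1) % 1000000007 :=
    pv_sum_table g _ hBlen hBg hallrev
  rw [pv_mod_eq, hsum, List.map_reverse, pv_NS_reverse]
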